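-- pv_equiv track=rewrite | github.com/yutsang/python-pptx | scripts/update_mappings_patterns.py | _detect_top_level_keys
-- ===== SOURCE A (Python) =====
-- from collections import OrderedDict, defaultdict
--
-- def _detect_top_level_keys(lines: list[str]) -> "OrderedDict[str, tuple[int, int]]":
--     """Return {key: (start_line, end_line_exclusive)} for every top-level item."""
--     sections: OrderedDict[str, tuple[int, int]] = OrderedDict()
--     current_key = None
--     start = 0
--     for i, line in enumerate(lines):
--         if line and not line.startswith((" ", "\t", "#", "\n")) and ":" in line:
--             head = line.split(":", 1)[0].strip()
--             if head:
--                 if current_key is not None: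
--                     sections[current_key] = (start, i)
--                 current_key = head
--                 start = i
--     if current_key is not None:
--         sections[current_key] = (start, len(lines))
--     return sections
-- ===== SOURCE B (Python) =====
-- def _detect_top_level_keys(lines: list[str]) -> "OrderedDict[str, tuple[int, int]]":
--     """Return {key: (start_line, end_line_exclusive)} for every top-level item."""
--     from collections import OrderedDict
--     bounds = []
--     for i, line in enumerate(lines):
--         if line and not line.startswith((" ", "\t", "#", "\n")) and ":" in line:
--             head = line.split(":", 1)[0].strip()
--             if head:
--                 bounds.append((head, i))
--     sections: "OrderedDict[str, tuple[int, int]]" = OrderedDict()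
--     for j, (head, start) in enumerate(bounds):
--         end = bounds[j + 1][1] if j + 1 < len(bounds) else len(lines)
--         sections[head] = (start, end)
--     return sections
-- ===== Notes on version B (the rewrite author's own statement) =====
-- stated objective: alternative
-- what changed: A's stateful single pass carrying current_key/start and emitting each section one boundary late is replaced by two passes: collect the (head, index) boundary list, then compute each entry's end from the next boundary (or len(lines)) and insert in order.
import Mathlib
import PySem

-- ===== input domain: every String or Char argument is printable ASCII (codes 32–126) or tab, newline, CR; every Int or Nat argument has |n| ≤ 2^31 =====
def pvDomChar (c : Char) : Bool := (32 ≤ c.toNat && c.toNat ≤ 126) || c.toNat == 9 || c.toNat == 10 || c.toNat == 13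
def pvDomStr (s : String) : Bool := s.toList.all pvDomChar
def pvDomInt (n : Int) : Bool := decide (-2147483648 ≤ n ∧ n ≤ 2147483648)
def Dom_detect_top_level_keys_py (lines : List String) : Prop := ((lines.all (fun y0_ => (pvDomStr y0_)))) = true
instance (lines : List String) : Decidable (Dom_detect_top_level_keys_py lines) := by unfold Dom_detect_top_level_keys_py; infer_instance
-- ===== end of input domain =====

-- B replaces A's stateful single pass (carrying current_key/start and emitting each range one boundary late)
-- by two passes: first collect the (head, index) boundary list, then compute each entry's end from the next
-- boundary (or len(lines)). Objective: alternative decomposition, same cost.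

-- ===== PORT A =====
-- shared guard/head: the identical line tests both Pythons perform
def pvGuard (line : String) : Bool :=
  (line != "") &&
  !(PySem.Str.startswith line " " || PySem.Str.startswith line "\t" ||
    PySem.Str.startswith line "#" || PySem.Str.startswith line "\n") &&
  PySem.Str.isIn ":" line

def pvHead (line : String) : String :=
  PySem.Str.strip (((PySem.Str.splitMax? line ":" 1).getD []).getD 0 "")

-- one step of A's loop over enumerate(lines); state = (sections, current_key, start)
def pvAStep (st : PySem.Dict String (Int × Int) × Option String × Int) (p : Int × String) :
    PySem.Dict String (Int × Int) × Option String × Int :=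
  if pvGuard p.2 then
    let head := pvHead p.2
    if head != "" then
      match st with
      | (d, some k, s) => (d.insert k (s, p.1), some head, p.1)
      | (d, none, _) => (d, some head, p.1)
    else st
  else st

-- A's trailing "if current_key is not None: sections[current_key] = (start, len(lines))"
def pvFin (st : PySem.Dict String (Int × Int) × Option String × Int) (N : Int) :
    PySem.Dict String (Int × Int) :=
  match st with
  | (d, some k, s) => d.insert k (s, N)
  | (d, none, _) => d

def detect_top_level_keys_py (lines : List String) : List (String × Int × Int) :=
  (pvFin ((PySem.List.enumerate lines 0).foldl pvAStep (PySem.Dict.empty, none, 0))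
    (lines.length : Int)).items

-- ===== PORT B =====
-- first pass of B: append (head, i) for every top-level boundary line
def pvBStep (acc : List (String × Int)) (p : Int × String) : List (String × Int) :=
  if pvGuard p.2 then
    let head := pvHead p.2
    if head != "" then acc ++ [(head, p.1)] else acc
  else acc

def detect_top_level_keys_py_alt (lines : List String) : List (String × Int × Int) :=
  let bounds := (PySem.List.enumerate lines 0).foldl pvBStep []
  let sections := (PySem.List.enumerate bounds 0).foldl
    (fun d q =>
      d.insert q.2.1 (q.2.2,
        if q.1 + 1 < (bounds.length : Int) then (PySem.List.pyGetD bounds (q.1 + 1) ("", 0)).2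
        else (lines.length : Int)))
    PySem.Dict.empty
  sections.items

-- ===== PRECONDITION & SPEC =====
def Spec_detect_top_level_keys_py (lines : List String) (out : List (String × Int × Int)) : Prop := out = detect_top_level_keys_py_alt lines
instance (lines : List String) (out : List (String × Int × Int)) : Decidable (Spec_detect_top_level_keys_py lines out) := by unfold Spec_detect_top_level_keys_py; infer_instance

-- ===== CLAIM (what is proved, stated in full; the proofs are below) =====
def Claim_equal_detect_top_level_keys_py : Prop := ∀ (lines : List String), Dom_detect_top_level_keys_py lines → Spec_detect_top_level_keys_py lines (detect_top_level_keys_py lines)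

-- ===== LEMMAS AND PROOFS =====

-- common abstraction: insert the ranges named by the boundary list bs, with pending entry cur
def pvIns (d : PySem.Dict String (Int × Int)) (cur : Option (String × Int))
    (bs : List (String × Int)) (N : Int) : PySem.Dict String (Int × Int) :=
  match bs, cur with
  | [], none => d
  | [], some (k, s) => d.insert k (s, N)
  | (h, i) :: rest, none => pvIns d (some (h, i)) rest N
  | (h, i) :: rest, some (k, s) => pvIns (d.insert k (s, i)) (some (h, i)) rest N

lemma pvBStep_acc (acc : List (String × Int)) (p : Int × String) :
    pvBStep acc p = acc ++ pvBStep [] p := by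
  unfold pvBStep
  by_cases h1 : pvGuard p.2 <;> by_cases h2 : pvHead p.2 = "" <;> simp [h1, h2]

lemma pvBStep_foldl (l : List (Int × String)) :
    ∀ acc, l.foldl pvBStep acc = acc ++ l.foldl pvBStep [] := by
  induction l with
  | nil => simp
  | cons p l ih =>
    intro acc
    rw [List.foldl_cons, List.foldl_cons, ih (pvBStep acc p), ih (pvBStep [] p),
      pvBStep_acc acc p, List.append_assoc]

-- A's loop + finalizer equals pvIns over the boundary list of the remaining lines
lemma pvA_eq (ls : List String) :
    ∀ (n : Int) (d : PySem.Dict String (Int × Int)) (cur : Option String) (s N : Int),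
    pvFin ((PySem.List.enumerate ls n).foldl pvAStep (d, cur, s)) N
      = pvIns d (cur.map fun k => (k, s)) ((PySem.List.enumerate ls n).foldl pvBStep []) N := by
  induction ls with
  | nil => intro n d cur s N; cases cur <;> simp [PySem.List.enumerate, pvFin, pvIns]
  | cons x ls ih =>
    intro n d cur s N
    rw [PySem.List.enumerate_cons, List.foldl_cons, List.foldl_cons, pvBStep_foldl]
    by_cases hg : pvGuard x
    · by_cases hh : pvHead x != ""
      · cases cur with
        | none => simp [pvAStep, pvBStep, hg, hh, ih, pvIns]
        | some k => simp [pvAStep, pvBStep, hg, hh, ih, pvIns]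
      · cases cur <;> simp [pvAStep, pvBStep, hg, hh, ih]
    · cases cur <;> simp [pvAStep, pvBStep, hg, ih]

-- B's second loop equals pvIns, for any suffix bs of the boundary list
lemma pvB_eq (bounds : List (String × Int)) (N : Int) :
    ∀ (bs : List (String × Int)) (j : Nat) (d : PySem.Dict String (Int × Int)),
    bounds.drop j = bs →
    (PySem.List.enumerate bs (j : Int)).foldl
      (fun d q =>
        d.insert q.2.1 (q.2.2,
          if q.1 + 1 < (bounds.length : Int) then (PySem.List.pyGetD bounds (q.1 + 1) ("", 0)).2
          else N)) d
      = pvIns d none bs N := by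
  intro bs
  induction bs with
  | nil => intro j d _; simp [PySem.List.enumerate, pvIns]
  | cons b0 bs ih =>
    intro j d hdrop
    have hj : j < bounds.length := by
      by_contra h
      have : bounds.drop j = [] := List.drop_eq_nil_of_le (by omega)
      rw [this] at hdrop; exact absurd hdrop (by simp)
    have hlen : bounds.length = j + bs.length + 1 := by
      have := congrArg List.length hdrop
      simp [List.length_drop] at this
      omega
    have hdrop' : bounds.drop (j + 1) = bs := by
      have h2 := congrArg (List.drop 1) hdrop
      simpa [List.drop_drop, Nat.add_comm] using h2
    rw [PySem.List.enumerate_cons, List.foldl_cons]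
    have hc : ((j : Int) + 1) = ((j + 1 : Nat) : Int) := by push_cast; ring
    cases bs with
    | nil =>
      have hb : bounds.length = j + 1 := by simp at hlen; omega
      have hend : ¬ (((j + 1 : Nat) : Int) < (bounds.length : Int)) := by
        rw [hb]; exact lt_irrefl _
      cases b0 with
      | mk h0 i0 =>
        rw [hc, if_neg hend]
        simp [PySem.List.enumerate, pvIns]
    | cons b1 bs' =>
      have hj1 : j + 1 < bounds.length := by simp at hlen; omega
      have hend : (((j + 1 : Nat) : Int) < (bounds.length : Int)) := by exact_mod_cast hj1
      have hget : PySem.List.pyGetD bounds (((j + 1 : Nat) : Int)) ("", 0) = b1 := by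
        rw [PySem.List.pyGetD_of_nonneg bounds ("", 0) (by omega)]
        have ht : (((j + 1 : Nat) : Int)).toNat = j + 1 := by omega
        rw [ht]
        have h1 : bounds[j + 1]? = some b1 := by
          have h2 : (bounds.drop j)[1]? = some b1 := by rw [hdrop]; rfl
          rwa [List.getElem?_drop] at h2
        simp [List.getD, h1]
      rw [hc, if_pos hend, hget, ih (j + 1) (d.insert b0.1 (b0.2, b1.2)) hdrop']
      cases b0 with
      | mk h0 i0 =>
        cases b1 with
        | mk h1v i1 => simp [pvIns]

-- ===== VERDICT (by name: the statement is the Claim_ definition above) =====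
theorem detect_top_level_keys_py_spec : Claim_equal_detect_top_level_keys_py := by
  intro lines _
  unfold Spec_detect_top_level_keys_py detect_top_level_keys_py
  simp only [detect_top_level_keys_py_alt]
  rw [pvA_eq lines 0 PySem.Dict.empty none 0 (lines.length : Int)]
  have hb := pvB_eq ((PySem.List.enumerate lines 0).foldl pvBStep []) (lines.length : Int)
    ((PySem.List.enumerate lines 0).foldl pvBStep []) 0 PySem.Dict.empty rfl
  rw [Nat.cast_zero] at hb
  rw [hb]
  simp
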